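-- pv_equiv track=rewrite | github.com/david-cattermole/sql-learning | python/mediaDB2/mounts.py | getMount
-- ===== SOURCE A (Python) =====
-- def getMount(mounts, path):
--     mount = None
--     mount_dir = None
--     keys = reversed(sorted(mounts.keys()))
--     for k in keys:
--         if path.startswith(k) is True:
--             mount = mounts[k]
--             mount_dir = k
--             break
--     return mount_dir, mount
-- ===== SOURCE B (Python) =====
-- def getMount(mounts, path):
--     # longest-prefix lookup: probe each prefix of path, longest first.
--     # No key longer than the longest mount key can match, so cap the probes there.
--     longest = 0
--     for k in mounts:
--         if len(k) > longest:
--             longest = len(k)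
--     top = min(len(path), longest)
--     for i in range(top, -1, -1):
--         p = path[:i]
--         if p in mounts:
--             return p, mounts[p]
--     return None, None
-- ===== Notes on version B (the rewrite author's own statement) =====
-- stated objective: faster
-- what changed: Instead of sorting all mount keys descending and scanning them with startswith, B probes each prefix of path (longest first, capped at the longest key length) directly in the dict, removing the sort and the key scan.
import Mathlib
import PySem

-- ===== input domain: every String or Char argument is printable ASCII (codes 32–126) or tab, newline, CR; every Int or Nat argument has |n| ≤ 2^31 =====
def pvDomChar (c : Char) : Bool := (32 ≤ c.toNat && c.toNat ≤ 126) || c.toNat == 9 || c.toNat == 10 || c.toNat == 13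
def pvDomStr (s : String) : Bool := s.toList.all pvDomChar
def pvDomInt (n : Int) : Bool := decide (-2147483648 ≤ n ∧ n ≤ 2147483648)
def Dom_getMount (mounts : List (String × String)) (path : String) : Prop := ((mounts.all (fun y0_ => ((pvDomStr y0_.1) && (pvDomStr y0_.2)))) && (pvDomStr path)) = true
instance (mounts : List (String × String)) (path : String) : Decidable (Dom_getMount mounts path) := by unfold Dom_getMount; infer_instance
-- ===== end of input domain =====

-- B replaces A's sort-all-keys-and-scan with direct dict probes of path's prefixes, longest first (objective: faster).

-- ===== PORT A =====
-- for k in reversed(sorted(mounts.keys())): if path.startswith(k): return k, mounts[k]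
def getMountLoopA (d : PySem.Dict String String) (path : String) : List String → Option String × Option String
  | [] => (none, none)
  | k :: ks =>
      if PySem.Str.startswith path k then (some k, d.get? k)
      else getMountLoopA d path ks

def getMount (mounts : List (String × String)) (path : String) : Option String × Option String :=
  let d : PySem.Dict String String := ⟨mounts⟩
  getMountLoopA d path (PySem.List.sorted d.keys (fun x => x) false).reverse

-- ===== PORT B =====
-- longest = max over keys of len(k); top = min(len(path), longest);
-- for i in range(top, -1, -1): p = path[:i]; if p in mounts: return p, mounts[p]
def maxKeyLen (keys : List String) : Int :=
  keys.foldl (fun acc k => if PySem.Str.len k > acc then PySem.Str.len k else acc) 0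

def getMountLoopB (d : PySem.Dict String String) (path : String) : List Int → Option String × Option String
  | [] => (none, none)
  | i :: is =>
      let p := PySem.Str.slice path none (some i)
      if d.contains p then (some p, d.get? p)
      else getMountLoopB d path is

def getMount_alt (mounts : List (String × String)) (path : String) : Option String × Option String :=
  let d : PySem.Dict String String := ⟨mounts⟩
  let top := min (PySem.Str.len path) (maxKeyLen d.keys)
  getMountLoopB d path (PySem.List.pyRange top (-1) (-1))

-- ===== PRECONDITION & SPEC =====
def Spec_getMount (mounts : List (String × String)) (path : String) (out : Option String × Option String) : Prop := out = getMount_alt mounts path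
instance (mounts : List (String × String)) (path : String) (out : Option String × Option String) : Decidable (Spec_getMount mounts path out) := by unfold Spec_getMount; infer_instance

-- ===== CLAIM (what is proved, stated in full; the proofs are below) =====
def Claim_equal_getMount : Prop := ∀ (mounts : List (String × String)) (path : String), Dom_getMount mounts path → Spec_getMount mounts path (getMount mounts path)

-- ===== LEMMAS AND PROOFS =====

lemma startswith_iff (s p : String) : PySem.Str.startswith s p = true ↔ p.toList <+: s.toList := by
  simp [PySem.Str.startswith, PySem.Chars.startswith]

lemma lex_of_prefix_ne {a b : List Char} (h : a <+: b) (hne : a ≠ b) : List.Lex (· < ·) a b := by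
  induction a generalizing b with
  | nil =>
    cases b with
    | nil => exact absurd rfl hne
    | cons y ys => exact List.Lex.nil
  | cons x xs ih =>
    cases b with
    | nil => exact absurd (List.prefix_nil.mp h) (by simp)
    | cons y ys =>
      rcases List.cons_prefix_cons.mp h with ⟨rfl, h2⟩
      exact List.Lex.cons (ih h2 (fun e => hne (by rw [e])))

lemma str_lt_of_prefix_ne {a b : String} (h : a.toList <+: b.toList) (hne : a ≠ b) : a < b := by
  rw [String.lt_iff_toList_lt]
  exact lex_of_prefix_ne h (fun e => hne (String.toList_inj.mp e))

lemma slice_toList (s : String) (i : Int) (h : 0 ≤ i) :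
    (PySem.Str.slice s none (some i)).toList = s.toList.take i.toNat := by
  simp [PySem.Str.slice, PySem.List.slice_to _ h]

lemma pyRange_down (n : Nat) :
    PySem.List.pyRange (n : Int) (-1) (-1) =
      (List.range (n + 1)).map (fun k : Nat => (n : Int) - (k : Int)) := by
  have hlt : (-1 : Int) < (n : Int) := by omega
  have hc : (((n : Int) - (-1) + -(-1) - 1) / -(-1)).toNat = n + 1 := by
    norm_num
  simp only [PySem.List.pyRange, if_neg (by omega : ¬ (-1 : Int) = 0),
    if_neg (by omega : ¬ (0 : Int) < -1), if_pos hlt, hc]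
  exact List.map_congr_left (fun k _ => by ring)

-- A's loop over a descending list finds the lexicographically greatest key that is a prefix.
lemma loopA_char (d : PySem.Dict String String) (path : String) (l : List String)
    (hp : l.Pairwise (fun a b => b ≤ a)) :
    (getMountLoopA d path l = (none, none) ∧ ∀ y ∈ l, ¬ PySem.Str.startswith path y = true) ∨
    (∃ k, getMountLoopA d path l = (some k, d.get? k) ∧ PySem.Str.startswith path k = true ∧
      k ∈ l ∧ ∀ y ∈ l, PySem.Str.startswith path y = true → y ≤ k) := by
  induction l with
  | nil => exact Or.inl ⟨rfl, by simp⟩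
  | cons x xs ih =>
    rw [List.pairwise_cons] at hp
    by_cases hx : PySem.Str.startswith path x = true
    · refine Or.inr ⟨x, by simp only [getMountLoopA]; rw [if_pos hx], hx, List.mem_cons_self, ?_⟩
      intro y hy _
      rcases List.mem_cons.mp hy with rfl | hy
      · exact le_rfl
      · exact hp.1 y hy
    · rcases ih hp.2 with ⟨heq, hall⟩ | ⟨k, heq, hk, hmem, hmax⟩
      · refine Or.inl ⟨by simp only [getMountLoopA]; rw [if_neg hx]; exact heq, ?_⟩
        intro y hy
        rcases List.mem_cons.mp hy with rfl | hy
        · exact hx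
        · exact hall y hy
      · refine Or.inr ⟨k, by simp only [getMountLoopA]; rw [if_neg hx]; exact heq, hk, List.mem_cons_of_mem _ hmem, ?_⟩
        intro y hy hys
        rcases List.mem_cons.mp hy with rfl | hy
        · exact absurd hys hx
        · exact hmax y hy hys
-- B's loop over a descending index list finds the greatest i whose prefix path[:i] is a key.
lemma loopB_char (d : PySem.Dict String String) (path : String) (l : List Int)
    (hp : l.Pairwise (fun a b => b ≤ a)) :
    (getMountLoopB d path l = (none, none) ∧
      ∀ j ∈ l, ¬ d.contains (PySem.Str.slice path none (some j)) = true) ∨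
    (∃ i, getMountLoopB d path l = (some (PySem.Str.slice path none (some i)),
        d.get? (PySem.Str.slice path none (some i))) ∧
      d.contains (PySem.Str.slice path none (some i)) = true ∧ i ∈ l ∧
      ∀ j ∈ l, d.contains (PySem.Str.slice path none (some j)) = true → j ≤ i) := by
  induction l with
  | nil => exact Or.inl ⟨rfl, by simp⟩
  | cons x xs ih =>
    rw [List.pairwise_cons] at hp
    by_cases hx : d.contains (PySem.Str.slice path none (some x)) = true
    · refine Or.inr ⟨x, by simp only [getMountLoopB]; rw [if_pos hx], hx, List.mem_cons_self, ?_⟩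
      intro j hj _
      rcases List.mem_cons.mp hj with rfl | hj
      · exact le_rfl
      · exact hp.1 j hj
    · rcases ih hp.2 with ⟨heq, hall⟩ | ⟨i, heq, hi, hmem, hmax⟩
      · refine Or.inl ⟨by simp only [getMountLoopB]; rw [if_neg hx]; exact heq, ?_⟩
        intro j hj
        rcases List.mem_cons.mp hj with rfl | hj
        · exact hx
        · exact hall j hj
      · refine Or.inr ⟨i, by simp only [getMountLoopB]; rw [if_neg hx]; exact heq, hi, List.mem_cons_of_mem _ hmem, ?_⟩
        intro j hj hjs
        rcases List.mem_cons.mp hj with rfl | hj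
        · exact absurd hjs hx
        · exact hmax j hj hjs

lemma mem_range_down (n : Nat) (i : Int) :
    i ∈ (List.range (n + 1)).map (fun k : Nat => (n : Int) - (k : Int)) ↔ 0 ≤ i ∧ i ≤ n := by
  simp only [List.mem_map, List.mem_range]
  constructor
  · rintro ⟨k, hk, rfl⟩; omega
  · rintro ⟨h0, h1⟩; exact ⟨((n : Int) - i).toNat, by omega, by omega⟩

lemma pairwise_range_down (n : Nat) :
    ((List.range (n + 1)).map (fun k : Nat => (n : Int) - (k : Int))).Pairwise (fun a b => b ≤ a) := by
  rw [List.pairwise_map]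
  refine List.pairwise_lt_range.imp ?_
  intro a b h
  omega

lemma maxKeyLen_eq_foldl_max (keys : List String) :
    maxKeyLen keys = keys.foldl (fun acc k => max acc (PySem.Str.len k)) 0 := by
  unfold maxKeyLen
  apply PySem.List.foldl_congr_mem
  intro acc x _
  rw [Int.max_def]
  split_ifs <;> omega

lemma maxKeyLen_nonneg (keys : List String) : 0 ≤ maxKeyLen keys := by
  rw [maxKeyLen_eq_foldl_max]
  exact (PySem.List.le_foldl_max_int keys _ 0).1

lemma le_maxKeyLen (keys : List String) (k : String) (hk : k ∈ keys) :
    PySem.Str.len k ≤ maxKeyLen keys := by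
  rw [maxKeyLen_eq_foldl_max]
  exact (PySem.List.le_foldl_max_int keys _ 0).2 k hk

-- the main equivalence, with the dict abstracted
lemma getMount_eq (d : PySem.Dict String String) (path : String) :
    getMountLoopA d path (PySem.List.sorted d.keys (fun x => x) false).reverse =
    getMountLoopB d path
      (PySem.List.pyRange (min (PySem.Str.len path) (maxKeyLen d.keys)) (-1) (-1)) := by
  set cs := path.toList with hcs
  set n := cs.length with hn
  set top := min (PySem.Str.len path) (maxKeyLen d.keys) with htop
  have hlenPath : PySem.Str.len path = (n : Int) := by rw [PySem.Str.len_eq]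
  have htop0 : 0 ≤ top := le_min (by omega) (maxKeyLen_nonneg _)
  have htopn : top ≤ (n : Int) := by rw [htop, hlenPath]; exact min_le_left _ _
  have hkeyTop : ∀ k : String, k ∈ d.keys → k.toList.length ≤ n →
      (k.toList.length : Int) ≤ top := by
    intro k hk hkn
    refine le_min ?_ (by rw [← PySem.Str.len_eq]; exact le_maxKeyLen _ k hk)
    rw [hlenPath]
    exact_mod_cast hkn
  -- the A-side list
  have hpermA : (PySem.List.sorted d.keys (fun x => x) false).reverse.Perm d.keys :=
    (List.reverse_perm _).trans (PySem.List.sorted_perm _ _ _)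
  have hpA : (PySem.List.sorted d.keys (fun x => x) false).reverse.Pairwise (fun a b => b ≤ a) :=
    List.pairwise_reverse.mpr (PySem.List.sorted_pairwise _ _)
  -- the B-side list
  have htopNat : ((top.toNat : Int)) = top := Int.toNat_of_nonneg htop0
  have hR : PySem.List.pyRange top (-1) (-1) =
      (List.range (top.toNat + 1)).map (fun k : Nat => ((top.toNat : Nat) : Int) - (k : Int)) := by
    conv_lhs => rw [← htopNat]
    exact pyRange_down top.toNat
  have hpB : (PySem.List.pyRange top (-1) (-1)).Pairwise (fun a b => b ≤ a) := by
    rw [hR]; exact pairwise_range_down top.toNat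
  have hmemR : ∀ i : Int, i ∈ PySem.List.pyRange top (-1) (-1) ↔ 0 ≤ i ∧ i ≤ top := by
    intro i; rw [hR, mem_range_down top.toNat i, htopNat]
  -- prefix facts
  have hsliceList : ∀ i : Int, 0 ≤ i → (PySem.Str.slice path none (some i)).toList = cs.take i.toNat :=
    fun i hi => slice_toList path i hi
  have hslicePrefix : ∀ i : Int, 0 ≤ i →
      PySem.Str.startswith path (PySem.Str.slice path none (some i)) = true := by
    intro i hi
    rw [startswith_iff, hsliceList i hi]
    exact List.take_prefix _ _
  have hkeySlice : ∀ k : String, PySem.Str.startswith path k = true →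
      PySem.Str.slice path none (some (k.toList.length : Int)) = k := by
    intro k hk
    rw [startswith_iff] at hk
    rw [← String.toList_inj, hsliceList _ (by positivity)]
    rw [Int.toNat_natCast]
    exact (List.prefix_iff_eq_take.mp hk).symm
  rcases loopA_char d path _ hpA with ⟨heqA, hallA⟩ | ⟨k, heqA, hkA, hmemA, hmaxA⟩ <;>
    rcases loopB_char d path _ hpB with ⟨heqB, hallB⟩ | ⟨i, heqB, hiB, hmemB, hmaxB⟩
  · rw [heqA, heqB]
  · -- A found nothing but B found prefix path[:i] ∈ keys: contradiction
    exfalso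
    set p := PySem.Str.slice path none (some i) with hp
    have hiR := (hmemR i).mp hmemB
    have hpk : p ∈ d.keys := (PySem.Dict.contains_iff_mem_keys d p).mp hiB
    exact hallA p (hpermA.mem_iff.mpr hpk) (hslicePrefix i hiR.1)
  · -- A found key k but B found nothing: contradiction at index |k|
    exfalso
    have hk' := (startswith_iff path k).mp hkA
    have hlen : k.toList.length ≤ n := hk'.length_le
    have hmem : ((k.toList.length : Int)) ∈ PySem.List.pyRange top (-1) (-1) :=
      (hmemR _).mpr ⟨by positivity, hkeyTop k (hpermA.mem_iff.mp hmemA) hlen⟩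
    refine hallB _ hmem ?_
    rw [hkeySlice k hkA]
    exact (PySem.Dict.contains_iff_mem_keys d k).mpr (hpermA.mem_iff.mp hmemA)
  · -- both found: the keys coincide
    rw [heqA, heqB]
    set p := PySem.Str.slice path none (some i) with hp
    have hiR := (hmemR i).mp hmemB
    have hpPre : PySem.Str.startswith path p = true := hslicePrefix i hiR.1
    have hpKeys : p ∈ d.keys := (PySem.Dict.contains_iff_mem_keys d p).mp hiB
    have hin : i ≤ (n : Int) := le_trans hiR.2 htopn
    have hpLen : p.toList.length = i.toNat := by
      rw [hsliceList i hiR.1, List.length_take]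
      omega
    -- |k| ≤ i : B's index is maximal and |k| qualifies
    have hk' := (startswith_iff path k).mp hkA
    have hlenk : k.toList.length ≤ n := hk'.length_le
    have hkI : ((k.toList.length : Int)) ≤ i := by
      refine hmaxB _ ((hmemR _).mpr ⟨by positivity, hkeyTop k (hpermA.mem_iff.mp hmemA) hlenk⟩) ?_
      rw [hkeySlice k hkA]
      exact (PySem.Dict.contains_iff_mem_keys d k).mpr (hpermA.mem_iff.mp hmemA)
    -- p ≤ k : A's key is lex-maximal and p qualifies
    have hpK : p ≤ k := hmaxA p (hpermA.mem_iff.mpr hpKeys) hpPre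
    -- hence i ≤ |k| : otherwise k would be a strict prefix of p, so k < p
    have hik : i ≤ (k.toList.length : Int) := by
      by_contra hlt
      rw [not_le] at hlt
      have hkp : k.toList <+: p.toList := by
        refine List.prefix_of_prefix_length_le hk' ((startswith_iff path p).mp hpPre) ?_
        omega
      have hne : k ≠ p := by
        intro e
        rw [e] at hlt
        omega
      exact absurd hpK (not_le.mpr (str_lt_of_prefix_ne hkp hne))
    have : p = k := by
      rw [← String.toList_inj, hsliceList i hiR.1]
      have : i.toNat = k.toList.length := by omega
      rw [this]
      exact (List.prefix_iff_eq_take.mp hk').symm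
    rw [this]

-- ===== VERDICT (by name: the statement is the Claim_ definition above) =====
theorem getMount_spec : Claim_equal_getMount := by
  intro mounts path _
  unfold Spec_getMount getMount getMount_alt
  exact getMount_eq ⟨mounts⟩ path
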